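-- pv_equiv track=rewrite | github.com/openmednlp/openmednlp | ml/ris/gastro/risnlp/dataset/collection.py | index_tokenized_sentences
-- ===== SOURCE A (Python) =====
-- def index_tokenized_sentences(tokenized_sentences):
--     # TODO: I needed this for word2vec, but maybe not needed anymroe
--     word_dict = dict()
--     X = []
--     i = 0
--     for tokenized_sentence in tokenized_sentences:
--         indexed_sentence = []
--         for word in tokenized_sentence:
--             if word not in word_dict:
--                 i += 1
--                 word_dict[word] = i
--             indexed_sentence.append(word_dict[word])
--         X.append(indexed_sentence)
--     return X, word_dict
-- ===== SOURCE B (Python) =====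
-- def index_tokenized_sentences(tokenized_sentences):
--     # Two-pass: build the full word->index map first, then index all sentences.
--     word_dict = {}
--     for sentence in tokenized_sentences:
--         for word in sentence:
--             if word not in word_dict:
--                 word_dict[word] = len(word_dict) + 1
--     X = [[word_dict[word] for word in sentence] for sentence in tokenized_sentences]
--     return X, word_dict
-- ===== Notes on version B (the rewrite author's own statement) =====
-- stated objective: simpler
-- what changed: Splits A's single interleaved pass (which grows the dict and the output together with an explicit counter i) into two passes: one pass builds the whole word->index dict using len(word_dict)+1 for fresh words, then a nested comprehension maps every sentence through the finished dict.
import Mathlib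
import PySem

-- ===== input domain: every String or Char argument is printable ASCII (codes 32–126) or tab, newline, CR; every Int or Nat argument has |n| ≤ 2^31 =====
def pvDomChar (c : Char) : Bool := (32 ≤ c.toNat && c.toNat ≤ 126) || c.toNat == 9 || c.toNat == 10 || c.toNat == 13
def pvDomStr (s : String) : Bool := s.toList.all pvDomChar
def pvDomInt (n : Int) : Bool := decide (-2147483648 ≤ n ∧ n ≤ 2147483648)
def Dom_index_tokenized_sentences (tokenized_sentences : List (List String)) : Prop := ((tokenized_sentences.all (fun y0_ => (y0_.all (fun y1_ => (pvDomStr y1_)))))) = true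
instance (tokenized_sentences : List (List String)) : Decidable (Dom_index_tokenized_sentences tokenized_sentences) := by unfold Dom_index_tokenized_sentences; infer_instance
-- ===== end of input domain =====

-- B replaces A's single interleaved pass (dict, counter i and output grown together) by two
-- passes: build the full word->index dict first, then map every sentence through it (simpler).


-- ===== PORT A =====
-- A's inner loop body: state (indexed_sentence, word_dict, i); `word_dict[word]` is read with
-- getD (the key is always present at that point, so this is exact).
def itsInnerA (st : List Int × PySem.Dict String Int × Int) (word : String) :
    List Int × PySem.Dict String Int × Int :=
  let st' : PySem.Dict String Int × Int :=
    if st.2.1.contains word then (st.2.1, st.2.2)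
    else (st.2.1.insert word (st.2.2 + 1), st.2.2 + 1)
  (st.1 ++ [st'.1.getD word 0], st'.1, st'.2)

def itsOuterA (st : List (List Int) × PySem.Dict String Int × Int) (sent : List String) :
    List (List Int) × PySem.Dict String Int × Int :=
  let inner := sent.foldl itsInnerA ([], st.2.1, st.2.2)
  (st.1 ++ [inner.1], inner.2.1, inner.2.2)

def index_tokenized_sentences (tokenized_sentences : List (List String)) :
    List (List Int) × (List (String × Int)) :=
  let st := tokenized_sentences.foldl itsOuterA ([], PySem.Dict.empty, (0 : Int))
  (st.1, st.2.1.items)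

-- ===== PORT B =====
-- first pass: if word not in word_dict: word_dict[word] = len(word_dict) + 1
def itsStepB (d : PySem.Dict String Int) (word : String) : PySem.Dict String Int :=
  if d.contains word then d else d.insert word ((d.size : Int) + 1)

def itsBuildB (tokenized_sentences : List (List String)) : PySem.Dict String Int :=
  tokenized_sentences.foldl (fun d sent => sent.foldl itsStepB d) PySem.Dict.empty

def index_tokenized_sentences_alt (tokenized_sentences : List (List String)) :
    List (List Int) × (List (String × Int)) :=
  let word_dict := itsBuildB tokenized_sentences
  (tokenized_sentences.map (fun sent => sent.map (fun word => word_dict.getD word 0)),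
   word_dict.items)

-- ===== PRECONDITION & SPEC =====
def Spec_index_tokenized_sentences (tokenized_sentences : List (List String)) (out : List (List Int) × (List (String × Int))) : Prop := out = index_tokenized_sentences_alt tokenized_sentences
instance (tokenized_sentences : List (List String)) (out : List (List Int) × (List (String × Int))) : Decidable (Spec_index_tokenized_sentences tokenized_sentences out) := by unfold Spec_index_tokenized_sentences; infer_instance

-- ===== CLAIM (what is proved, stated in full; the proofs are below) =====
def Claim_equal_index_tokenized_sentences : Prop := ∀ (tokenized_sentences : List (List String)), Dom_index_tokenized_sentences tokenized_sentences → Spec_index_tokenized_sentences tokenized_sentences (index_tokenized_sentences tokenized_sentences)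

-- ===== LEMMAS AND PROOFS =====

-- `D` extends `d`: every binding of d is still in D.
def itsExt (d D : PySem.Dict String Int) : Prop :=
  ∀ w v, d.get? w = some v → D.get? w = some v

theorem itsExt_refl (d : PySem.Dict String Int) : itsExt d d := fun _ _ h => h

theorem itsStepB_stable (d : PySem.Dict String Int) (w' w : String) (v : Int)
    (h : d.get? w = some v) : (itsStepB d w').get? w = some v := by
  unfold itsStepB
  split
  · exact h
  · rename_i hc
    rcases eq_or_ne w w' with rfl | hne
    · have hcw : d.contains w = true := by
        rw [PySem.Dict.contains_eq_isSome_get?, h]; rfl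
      exact absurd hcw hc
    · rwa [PySem.Dict.get?_insert_of_ne d _ hne]

theorem itsFoldB_stable (ws : List String) (d : PySem.Dict String Int) (w : String) (v : Int)
    (h : d.get? w = some v) : (ws.foldl itsStepB d).get? w = some v := by
  induction ws generalizing d with
  | nil => exact h
  | cons x xs ih => exact ih _ (itsStepB_stable d x w v h)

theorem itsFoldBB_stable (ts : List (List String)) (d : PySem.Dict String Int) (w : String) (v : Int)
    (h : d.get? w = some v) :
    (ts.foldl (fun d sent => sent.foldl itsStepB d) d).get? w = some v := by
  induction ts generalizing d with
  | nil => exact h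
  | cons s ss ih => exact ih _ (itsFoldB_stable s d w v h)

theorem itsStepB_mem (d : PySem.Dict String Int) (w : String) :
    ∃ v, (itsStepB d w).get? w = some v := by
  unfold itsStepB
  split
  · rename_i hc
    have := PySem.Dict.contains_eq_isSome_get? (d := d) (k := w)
    rw [hc] at this
    rcases hg : d.get? w with _ | v
    · rw [hg] at this; simp at this
    · exact ⟨v, rfl⟩
  · exact ⟨_, PySem.Dict.get?_insert_self _ _ _⟩

theorem itsStepB_size (d : PySem.Dict String Int) (w : String) :
    ((itsStepB d w).size : Int) = if d.contains w then (d.size : Int) else (d.size : Int) + 1 := by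
  unfold itsStepB
  split <;> rename_i hc <;> simp [hc, PySem.Dict.size_insert]

-- A's inner loop on a sentence, started with i = size of the dict, produces: the indices of the
-- words looked up in ANY dict D extending the dict after the sentence, the B-built dict, its size.
theorem itsInner_eq (sent : List String) (d : PySem.Dict String Int) (acc : List Int)
    (D : PySem.Dict String Int) (hD : itsExt (sent.foldl itsStepB d) D) :
    sent.foldl itsInnerA (acc, d, (d.size : Int)) =
      (acc ++ sent.map (fun w => D.getD w 0), sent.foldl itsStepB d,
       ((sent.foldl itsStepB d).size : Int)) := by
  induction sent generalizing d acc with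
  | nil => simp
  | cons w ws ih =>
    obtain ⟨v, hv⟩ := itsStepB_mem d w
    have hDv : D.get? w = some v := hD w v (itsFoldB_stable ws _ w v hv)
    have hgd : (itsStepB d w).getD w 0 = v := by
      rw [PySem.Dict.getD_eq_get?_getD, hv]; rfl
    have hDgd : D.getD w 0 = v := by
      rw [PySem.Dict.getD_eq_get?_getD, hDv]; rfl
    have hsize := itsStepB_size d w
    have hstep : itsInnerA (acc, d, (d.size : Int)) w =
        (acc ++ [v], itsStepB d w, ((itsStepB d w).size : Int)) := by
      by_cases hc : d.contains w
      · unfold itsInnerA itsStepB at *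
        simp_all
      · unfold itsInnerA itsStepB at *
        simp_all [PySem.Dict.size_insert]
    rw [List.foldl_cons, hstep, ih (itsStepB d w) (acc ++ [v]) hD]
    simp [hDgd]

-- A's outer loop, same shape one level up.
theorem itsOuter_eq (ts : List (List String)) (d : PySem.Dict String Int)
    (acc : List (List Int)) (D : PySem.Dict String Int)
    (hD : itsExt (ts.foldl (fun d sent => sent.foldl itsStepB d) d) D) :
    ts.foldl itsOuterA (acc, d, (d.size : Int)) =
      (acc ++ ts.map (fun sent => sent.map (fun w => D.getD w 0)),
       ts.foldl (fun d sent => sent.foldl itsStepB d) d,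
       ((ts.foldl (fun d sent => sent.foldl itsStepB d) d).size : Int)) := by
  induction ts generalizing d acc with
  | nil => simp
  | cons s ss ih =>
    have hDs : itsExt (s.foldl itsStepB d) D := fun w v h =>
      hD w v (itsFoldBB_stable ss _ w v h)
    have hstep : itsOuterA (acc, d, (d.size : Int)) s =
        (acc ++ [s.map (fun w => D.getD w 0)], s.foldl itsStepB d,
         ((s.foldl itsStepB d).size : Int)) := by
      unfold itsOuterA
      rw [itsInner_eq s d [] D hDs]
      simp
    rw [List.foldl_cons, hstep, ih (s.foldl itsStepB d) _ hD]
    simp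

-- ===== VERDICT (by name: the statement is the Claim_ definition above) =====
theorem index_tokenized_sentences_spec : Claim_equal_index_tokenized_sentences := by
  intro ts _
  show index_tokenized_sentences ts = index_tokenized_sentences_alt ts
  unfold index_tokenized_sentences index_tokenized_sentences_alt itsBuildB
  have h0 : ((PySem.Dict.empty : PySem.Dict String Int).size : Int) = 0 := by
    simp [PySem.Dict.size_empty]
  rw [← h0, itsOuter_eq ts PySem.Dict.empty []
      (ts.foldl (fun d sent => sent.foldl itsStepB d) PySem.Dict.empty) (itsExt_refl _)]
  simp
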